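-- pv_equiv track=rewrite | github.com/AloyTec/Demo_nav | backend/app.py | balance_load
-- ===== SOURCE A (Python) =====
-- def balance_load(clusters):
--     """Balance the number of drivers across vans"""
--     while True:
--         sizes = [len(c) for c in clusters]
--         max_idx = sizes.index(max(sizes))
--         min_idx = sizes.index(min(sizes))
--
--         if sizes[max_idx] - sizes[min_idx] <= 1:
--             break
--
--         # Move one driver from largest to smallest
--         driver = clusters[max_idx].pop()
--         clusters[min_idx].append(driver)
--
--     return clusters
-- ===== SOURCE B (Python) =====
-- def _bisect(L, s, i):
--     """First position p in lex-sorted L with L[p] >= (s, i); binary search."""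
--     lo, hi = 0, len(L)
--     while lo < hi:
--         mid = (lo + hi) // 2
--         ls, li = L[mid]
--         if ls < s or (ls == s and li < i):
--             lo = mid + 1
--         else:
--             hi = mid
--     return lo
--
--
-- def balance_load(clusters):
--     """Balance the number of drivers across vans.
--
--     Keeps a lex-sorted list L of (size, index) pairs: the minimum is L[0],
--     the maximum size is L[-1][0], and the first (lowest-index) largest van
--     is found by binary search instead of rescanning all sizes; each move
--     updates L by two deletions and two sorted insertions.
--     Mutates `clusters` like the original."""
--     L = []
--     for i, c in enumerate(clusters):
--         L.insert(_bisect(L, len(c), i), (len(c), i))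
--     while L:
--         mn, j = L[0]
--         mx = L[-1][0]
--         if mx - mn <= 1:
--             break
--         p = _bisect(L, mx, -1)
--         i = L[p][1]
--         del L[p]
--         del L[0]
--         L.insert(_bisect(L, mx - 1, i), (mx - 1, i))
--         L.insert(_bisect(L, mn + 1, j), (mn + 1, j))
--         clusters[j].append(clusters[i].pop())
--     return clusters
-- ===== Notes on version B (the rewrite author's own statement) =====
-- stated objective: alternative
-- what changed: B maintains a lex-sorted list of (size, index) pairs: min is the first element, max size the last, the first largest van is found by binary search, and each move does two deletions and two sorted insertions, instead of A's full argmax/argmin rescan of all sizes per move.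
import Mathlib
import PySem

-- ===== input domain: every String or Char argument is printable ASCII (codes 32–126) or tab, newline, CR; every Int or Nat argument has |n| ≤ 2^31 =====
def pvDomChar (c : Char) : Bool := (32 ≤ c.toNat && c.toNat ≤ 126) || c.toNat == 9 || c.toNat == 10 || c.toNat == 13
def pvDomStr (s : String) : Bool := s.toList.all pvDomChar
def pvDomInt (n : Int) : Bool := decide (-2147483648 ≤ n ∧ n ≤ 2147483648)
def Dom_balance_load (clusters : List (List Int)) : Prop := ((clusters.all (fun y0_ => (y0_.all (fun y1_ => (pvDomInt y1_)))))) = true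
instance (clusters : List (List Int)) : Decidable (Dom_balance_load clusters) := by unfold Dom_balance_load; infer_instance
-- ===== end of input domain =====

set_option maxRecDepth 4000


-- B replaces A's per-move argmax/argmin rescan of all sizes by a lex-sorted list of
-- (size, index) pairs maintained across moves: min = first element, max size = last,
-- the first largest van found by binary search, two deletions + two sorted insertions per move.
-- Equal return values; both A and B mutate `clusters` in place in Python, identically.

-- ===== PORT A =====
-- fuel: a bound on the number of loop iterations (each move strictly decreases the sum of
-- squared sizes); purely a totality guard, proofs hold for every fuel.
def pvFuel (clusters : List (List Int)) : Nat :=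
  clusters.foldl (fun a c => a + c.length * c.length) 0 + 1

def pvGoA : Nat → List (List Int) → List (List Int)
  | 0, cl => cl
  | fuel+1, cl =>
    let sizes := cl.map fun c => (c.length : Int)
    if sizes = [] then cl          -- Python: max() of an empty sequence raises ValueError (outside Pre_)
    else
      let mx := (PySem.List.max? sizes (fun y => y)).getD 0
      let mn := (PySem.List.min? sizes (fun y => y)).getD 0
      let maxIdx := (PySem.List.index? sizes mx).getD 0   -- value returned by max is present: .index never raises
      let minIdx := (PySem.List.index? sizes mn).getD 0
      if PySem.List.pyGetD sizes (maxIdx : Int) 0 - PySem.List.pyGetD sizes (minIdx : Int) 0 ≤ 1 then cl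
      else
        -- driver = clusters[max_idx].pop(); clusters[min_idx].append(driver)
        let pr := (PySem.List.pop? (PySem.List.pyGetD cl (maxIdx : Int) [])).getD (0, [])  -- largest cluster nonempty here
        pvGoA fuel ((cl.set maxIdx pr.2).set minIdx
          (PySem.List.pyGetD (cl.set maxIdx pr.2) (minIdx : Int) [] ++ [pr.1]))

def balance_load (clusters : List (List Int)) : List (List Int) :=
  pvGoA (pvFuel clusters) clusters

-- ===== PORT B =====
-- `ls < s or (ls == s and li < i)`: Python's lexicographic comparison written out in Source B
def pvLt (a b : Int × Int) : Bool := a.1 < b.1 || (a.1 == b.1 && a.2 < b.2)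

-- _bisect: binary search for the first position p with L[p] >= (s, i) lexicographically;
-- lo, hi are nonnegative Python ints, so `(lo+hi)//2` is exactly Nat division here
def pvBisectLoop (L : List (Int × Int)) (s i : Int) (lo hi : Nat) : Nat :=
  if _h : lo < hi then
    let mid := (lo + hi) / 2
    if pvLt (PySem.List.pyGetD L (mid : Int) (0, 0)) (s, i) then pvBisectLoop L s i (mid + 1) hi
    else pvBisectLoop L s i lo mid
  else lo
termination_by hi - lo
decreasing_by all_goals omega

def pvBisect (L : List (Int × Int)) (s i : Int) : Nat := pvBisectLoop L s i 0 L.length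

-- the while loop of Source B; fuel is the same totality guard as in port A
def pvGoB : Nat → List (List Int) → List (Int × Int) → List (List Int)
  | 0, cl, _ => cl
  | fuel+1, cl, L =>
    if L = [] then cl
    else
      let b0 := PySem.List.pyGetD L 0 (0, 0)            -- mn, j = L[0]
      let mx := (PySem.List.pyGetD L (-1) (0, 0)).1     -- mx = L[-1][0]
      if mx - b0.1 ≤ 1 then cl
      else
        let p := pvBisect L mx (-1)
        let i := (PySem.List.pyGetD L (p : Int) (0, 0)).2
        let L2 := (L.eraseIdx p).eraseIdx 0             -- del L[p]; del L[0] (in-range nonneg indices)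
        let L3 := PySem.List.insert L2 ((pvBisect L2 (mx - 1) i : Nat) : Int) (mx - 1, i)
        let L4 := PySem.List.insert L3 ((pvBisect L3 (b0.1 + 1) b0.2 : Nat) : Int) (b0.1 + 1, b0.2)
        -- clusters[j].append(clusters[i].pop())  (i, j are in-range nonnegative indices here)
        let pr := (PySem.List.pop? (PySem.List.pyGetD cl i [])).getD (0, [])
        pvGoB fuel ((cl.set i.toNat pr.2).set b0.2.toNat
          (PySem.List.pyGetD (cl.set i.toNat pr.2) b0.2 [] ++ [pr.1])) L4

def balance_load_alt (clusters : List (List Int)) : List (List Int) :=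
  pvGoB (pvFuel clusters) clusters
    ((PySem.List.enumerate clusters 0).foldl
      (fun L pc => PySem.List.insert L ((pvBisect L (pc.2.length : Int) pc.1 : Nat) : Int)
        ((pc.2.length : Int), pc.1)) [])

-- ===== PRECONDITION & SPEC =====
-- Pre_ excludes only the empty list, on which Python A raises ValueError (max of empty sequence).
def Pre_balance_load (clusters : List (List Int)) : Prop := clusters ≠ []
instance (clusters : List (List Int)) : Decidable (Pre_balance_load clusters) := by
  unfold Pre_balance_load; infer_instance

def pvWitness_balance_load : List (List Int) := [[1, 2, 3], [4]]

def Spec_balance_load (clusters : List (List Int)) (out : List (List Int)) : Prop := out = balance_load_alt clusters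
instance (clusters : List (List Int)) (out : List (List Int)) : Decidable (Spec_balance_load clusters out) := by unfold Spec_balance_load; infer_instance

-- ===== CLAIM (what is proved, stated in full; the proofs are below) =====
def Claim_equal_balance_load : Prop := ∀ (clusters : List (List Int)), Dom_balance_load clusters → Pre_balance_load clusters → Spec_balance_load clusters (balance_load clusters)

-- ===== LEMMAS AND PROOFS =====

-- pvLt is Python's strict lexicographic order on int pairs
theorem pvLt_iff (a b : Int × Int) : pvLt a b = true ↔ (a.1 < b.1 ∨ (a.1 = b.1 ∧ a.2 < b.2)) := by
  simp [pvLt]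

theorem pvLt_trans {a b c : Int × Int} (h1 : pvLt a b = true) (h2 : pvLt b c = true) :
    pvLt a c = true := by
  rw [pvLt_iff] at *; omega

theorem pvLt_of_not_of_ne {a b : Int × Int} (h : pvLt b a = false) (hne : b ≠ a) :
    pvLt a b = true := by
  rcases a with ⟨a1, a2⟩; rcases b with ⟨b1, b2⟩
  simp only [pvLt, Bool.or_eq_false_iff, Bool.and_eq_false_iff, decide_eq_false_iff_not,
    beq_eq_false_iff_ne, ne_eq, Prod.mk.injEq, not_and, beq_iff_eq,
    Bool.or_eq_true, Bool.and_eq_true, decide_eq_true_eq] at h hne ⊢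
  by_cases h1 : b1 = a1
  · subst h1
    rcases h with ⟨-, h2⟩
    rcases h2 with h2 | h2
    · exact absurd rfl h2
    · right; exact ⟨rfl, by have := hne rfl; omega⟩
  · rcases h with ⟨h3, -⟩
    left; omega

theorem pvLt_false_iff (a b : Int × Int) :
    pvLt a b = false ↔ ¬ (a.1 < b.1 ∨ (a.1 = b.1 ∧ a.2 < b.2)) := by
  rw [Bool.eq_false_iff]
  exact not_congr (pvLt_iff a b)

-- the (size, index) pairs of a size list, as Source B builds them
def pvPairsAux (szs : List Int) (s : Int) : List (Int × Int) :=
  (PySem.List.enumerate szs s).map (fun p => (p.2, p.1))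

def pvPairs (szs : List Int) : List (Int × Int) := pvPairsAux szs 0

theorem length_pvPairs (szs : List Int) : (pvPairs szs).length = szs.length := by
  simp [pvPairs, pvPairsAux, PySem.List.length_enumerate]

theorem getElem_pvPairs (szs : List Int) (k : Nat) (h : k < (pvPairs szs).length) :
    (pvPairs szs)[k] = (szs[k]'(by rw [length_pvPairs] at h; exact h), (k : Int)) := by
  simp only [pvPairs, pvPairsAux]
  have hk : k < szs.length := by rw [length_pvPairs] at h; exact h
  rw [List.getElem_map, PySem.List.getElem_enumerate]
  simp

theorem mem_pvPairs {szs : List Int} {y : Int × Int} (h : y ∈ pvPairs szs) :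
    ∃ (k : Nat) (hk : k < szs.length), y = (szs[k], (k : Int)) := by
  simp only [pvPairs, pvPairsAux, List.mem_map] at h
  obtain ⟨p, hp, hy⟩ := h
  rw [PySem.List.mem_enumerate_iff] at hp
  obtain ⟨k, hk, hpk⟩ := hp
  exact ⟨k, hk, by subst hpk; simpa using hy.symm⟩

theorem nodup_pvPairs (szs : List Int) : (pvPairs szs).Nodup := by
  rw [List.nodup_iff_getElem?_ne_getElem?]
  intro i j hij hj
  rw [length_pvPairs] at hj
  rw [List.getElem?_eq_getElem (by rw [length_pvPairs]; omega),
      List.getElem?_eq_getElem (by rw [length_pvPairs]; omega)]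
  rw [getElem_pvPairs, getElem_pvPairs]
  simp only [ne_eq, Option.some.injEq, Prod.mk.injEq, not_and]
  intro _
  exact_mod_cast Nat.ne_of_lt hij

theorem pvPairs_set (szs : List Int) (k : Nat) (v : Int) (hk : k < szs.length) :
    pvPairs (szs.set k v) = (pvPairs szs).set k (v, (k : Int)) := by
  apply List.ext_getElem
  · simp [length_pvPairs]
  · intro n h1 h2
    rw [List.getElem_set]
    rw [getElem_pvPairs, getElem_pvPairs]
    by_cases hnk : k = n
    · subst hnk; simp [List.getElem_set_self]
    · rw [if_neg hnk, List.getElem_set_ne hnk]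

-- a set-position is a move-to-front permutation
theorem perm_set_cons_eraseIdx {α : Type} (l : List α) (k : Nat) (x : α) (hk : k < l.length) :
    (l.set k x).Perm (x :: l.eraseIdx k) := by
  rw [List.set_eq_take_append_cons_drop, if_pos hk, List.eraseIdx_eq_take_drop_succ]
  exact List.perm_middle

-- binary-search loop: on a pvLt-sorted list it returns the first position p with ¬ L[p] < (s,i)
theorem pvBisectLoop_spec (L : List (Int × Int)) (s i : Int)
    (hs : L.Pairwise (fun a b => pvLt a b = true)) :
    ∀ (m lo hi : Nat), hi - lo ≤ m → lo ≤ hi → hi ≤ L.length →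
    (∀ q (hq : q < L.length), q < lo → pvLt L[q] (s, i) = true) →
    (∀ q (hq : q < L.length), hi ≤ q → pvLt L[q] (s, i) = false) →
    (pvBisectLoop L s i lo hi ≤ L.length ∧
     (∀ q (hq : q < L.length), q < pvBisectLoop L s i lo hi → pvLt L[q] (s, i) = true) ∧
     (∀ q (hq : q < L.length), pvBisectLoop L s i lo hi ≤ q → pvLt L[q] (s, i) = false)) := by
  intro m
  induction m with
  | zero =>
    intro lo hi hm hle hlen hbelow habove
    have heq : lo = hi := by omega
    rw [pvBisectLoop, dif_neg (by omega)]
    subst heq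
    exact ⟨by omega, hbelow, habove⟩
  | succ m ih =>
    intro lo hi hm hle hlen hbelow habove
    by_cases hlh : lo < hi
    · rw [pvBisectLoop, dif_pos hlh]
      have hmidlt : (lo + hi) / 2 < hi := by omega
      have hmidge : lo ≤ (lo + hi) / 2 := by omega
      have hmidlen : (lo + hi) / 2 < L.length := by omega
      have hget : PySem.List.pyGetD L (((lo + hi) / 2 : Nat) : Int) (0, 0) = L[(lo + hi) / 2] := by
        rw [PySem.List.pyGetD_natCast, List.getD_eq_getElem _ _ hmidlen]
      simp only [hget]
      by_cases hcmp : pvLt L[(lo + hi) / 2] (s, i) = true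
      · rw [if_pos hcmp]
        refine ih ((lo + hi) / 2 + 1) hi (by omega) (by omega) hlen ?_ habove
        intro q hq hqlt
        by_cases hqlo : q < lo
        · exact hbelow q hq hqlo
        · by_cases hqmid : q = (lo + hi) / 2
          · subst hqmid; exact hcmp
          · have hqlt' : q < (lo + hi) / 2 := by omega
            exact pvLt_trans (List.pairwise_iff_getElem.mp hs q _ hq hmidlen hqlt') hcmp
      · rw [if_neg hcmp]
        refine ih lo ((lo + hi) / 2) (by omega) (by omega) (by omega) hbelow ?_
        intro q hq hqge
        by_cases hqmid : q = (lo + hi) / 2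
        · subst hqmid; exact Bool.eq_false_iff.mpr hcmp
        · have hmidq : (lo + hi) / 2 < q := by omega
          rw [Bool.eq_false_iff]
          intro hqtrue
          exact hcmp (pvLt_trans (List.pairwise_iff_getElem.mp hs _ q hmidlen hq hmidq) hqtrue)
    · rw [pvBisectLoop, dif_neg hlh]
      have heq : lo = hi := by omega
      subst heq
      exact ⟨by omega, hbelow, habove⟩

theorem pvBisect_spec (L : List (Int × Int)) (s i : Int)
    (hs : L.Pairwise (fun a b => pvLt a b = true)) :
    (pvBisect L s i ≤ L.length ∧
     (∀ q (hq : q < L.length), q < pvBisect L s i → pvLt L[q] (s, i) = true) ∧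
     (∀ q (hq : q < L.length), pvBisect L s i ≤ q → pvLt L[q] (s, i) = false)) := by
  exact pvBisectLoop_spec L s i hs L.length 0 L.length (by omega) (by omega) le_rfl
    (by intro q hq h; omega) (by intro q hq h; omega)

-- sorted insertion at the bisect position keeps the list sorted and is a cons up to permutation
theorem insert_bisect (L : List (Int × Int)) (x : Int × Int)
    (hs : L.Pairwise (fun a b => pvLt a b = true)) (hd : ∀ y ∈ L, y.2 ≠ x.2) :
    (PySem.List.insert L ((pvBisect L x.1 x.2 : Nat) : Int) x).Pairwise (fun a b => pvLt a b = true) ∧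
    (PySem.List.insert L ((pvBisect L x.1 x.2 : Nat) : Int) x).Perm (x :: L) := by
  obtain ⟨hr, hlo, hhi⟩ := pvBisect_spec L x.1 x.2 hs
  set r := pvBisect L x.1 x.2 with hrdef
  rw [PySem.List.insert_natCast L r x hr]
  constructor
  · rw [List.pairwise_append]
    refine ⟨List.Pairwise.sublist (List.take_sublist r L) hs, ?_, ?_⟩
    · rw [List.pairwise_cons]
      refine ⟨?_, List.Pairwise.sublist (List.drop_sublist r L) hs⟩
      intro y hy
      rw [List.mem_iff_getElem] at hy
      obtain ⟨t, ht, hval⟩ := hy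
      rw [List.getElem_drop] at hval
      have hql : r + t < L.length := by rw [List.length_drop] at ht; omega
      have hfalse : pvLt L[r + t] (x.1, x.2) = false := hhi (r + t) hql (by omega)
      have hne : L[r + t] ≠ x := by
        intro hcontra
        exact hd x (hcontra ▸ List.getElem_mem hql) rfl
      have := pvLt_of_not_of_ne (a := x) (b := L[r + t]) (by simpa using hfalse) hne
      rw [← hval]
      simpa using this
    · intro a ha b hb
      rw [List.mem_iff_getElem] at ha
      obtain ⟨q, hq, hval⟩ := ha
      rw [List.getElem_take] at hval
      have hql : q < L.length := by rw [List.length_take] at hq; omega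
      have hqr : q < r := by rw [List.length_take] at hq; omega
      rcases List.mem_cons.mp hb with hbx | hbd
      · subst hbx hval
        simpa using hlo q hql hqr
      · rw [List.mem_iff_getElem] at hbd
        obtain ⟨t, ht, hvalb⟩ := hbd
        rw [List.getElem_drop] at hvalb
        have htl : r + t < L.length := by rw [List.length_drop] at ht; omega
        subst hval hvalb
        exact List.pairwise_iff_getElem.mp hs q (r + t) hql htl (by omega)
  · calc (L.take r ++ x :: L.drop r).Perm (x :: (L.take r ++ L.drop r)) := List.perm_middle
      _ = x :: L := by rw [List.take_append_drop]

-- characterisation of list.index from "first position with this value"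
theorem pvIndex_eq (szs : List Int) (v : Int) (k : Nat) (hk : k < szs.length)
    (hv : szs[k] = v) (hfirst : ∀ j (hj : j < szs.length), j < k → szs[j] ≠ v) :
    PySem.List.index? szs v = some k := by
  rw [PySem.List.index?_eq_some_iff]
  refine ⟨szs.take k, szs.drop (k + 1), ?_, by simp [Nat.min_eq_left (Nat.le_of_lt hk)], ?_⟩
  · conv_lhs => rw [← List.take_append_drop k szs]
    rw [List.drop_eq_getElem_cons hk, hv]
  · intro hmem
    rw [List.mem_iff_getElem] at hmem
    obtain ⟨j, hj, hval⟩ := hmem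
    rw [List.length_take] at hj
    have hjk : j < k := lt_of_lt_of_le hj (Nat.min_le_left _ _)
    rw [List.getElem_take] at hval
    exact hfirst j (by omega) hjk hval

-- max()/min() of a list from an extremal member
theorem pvMax_eq {szs : List Int} {m : Int} (hm : m ∈ szs) (hmax : ∀ y ∈ szs, y ≤ m) :
    PySem.List.max? szs (fun y => y) = some m := by
  cases szs with
  | nil => cases hm
  | cons x t =>
    rw [PySem.List.max?_id_cons]
    have hmem : List.foldl max x t ∈ x :: t :=
      PySem.List.max?_mem (PySem.List.max?_id_cons x t)
    have hle : ∀ y ∈ x :: t, y ≤ List.foldl max x t :=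
      PySem.List.max?_isMax (PySem.List.max?_id_cons x t)
    exact congrArg some (le_antisymm (hmax _ hmem) (hle _ hm))

theorem pvMin_eq {szs : List Int} {m : Int} (hm : m ∈ szs) (hmin : ∀ y ∈ szs, m ≤ y) :
    PySem.List.min? szs (fun y => y) = some m := by
  cases szs with
  | nil => cases hm
  | cons x t =>
    rw [PySem.List.min?_id_cons]
    have hmem : List.foldl min x t ∈ x :: t :=
      PySem.List.min?_mem (PySem.List.min?_id_cons x t)
    have hle : ∀ y ∈ x :: t, List.foldl min x t ≤ y :=
      PySem.List.min?_isMin (PySem.List.min?_id_cons x t)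
    exact congrArg some (le_antisymm (hle _ hm) (hmin _ hmem))

-- L[-1] on a nonempty list
theorem pyGetD_neg_one {α : Type} (l : List α) (d : α) (h : 0 < l.length) :
    PySem.List.pyGetD l (-1) d = l.getD (l.length - 1) d := by
  simp only [PySem.List.pyGetD, PySem.List.pyGet?, PySem.List.pyIdx?]
  rw [if_neg (by omega), if_pos (by omega)]
  simp [List.getD_eq_getElem?_getD]

-- the main loop equivalence: B's sorted-pair loop computes A's loop, given the invariant
theorem pvMainLoop : ∀ (fuel : Nat) (cl : List (List Int)) (L : List (Int × Int)),
    L.Pairwise (fun a b => pvLt a b = true) →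
    L.Perm (pvPairs (cl.map fun c => (c.length : Int))) →
    pvGoB fuel cl L = pvGoA fuel cl := by
  intro fuel
  induction fuel with
  | zero => intro cl L _ _; simp [pvGoA, pvGoB]
  | succ fuel ih =>
    intro cl L hs hp
    by_cases hcl : cl = []
    · subst hcl
      have hL : L = [] := by
        have hnil : pvPairs ([] : List Int) = [] := by
          simp [pvPairs, pvPairsAux, PySem.List.enumerate]
        exact List.perm_nil.mp (by simpa [hnil] using hp)
      subst hL
      simp [pvGoA, pvGoB]
    · set szs : List Int := cl.map (fun c => (c.length : Int)) with hszs
      have hszlen : szs.length = cl.length := by simp [hszs]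
      have hszne : szs ≠ [] := by simpa [hszs] using hcl
      have hlen : L.length = szs.length := by
        rw [hp.length_eq, length_pvPairs]
      have h0len : 0 < L.length := by
        rw [hlen]; exact List.length_pos_iff.mpr hszne
      -- nonnegative indices of all pairs in L
      have hsnd : ∀ y ∈ L, 0 ≤ y.2 := by
        intro y hy
        obtain ⟨k, hk, hv⟩ := mem_pvPairs (hp.subset hy)
        subst hv; positivity
      -- members of L are exactly the (szs[k], k)
      have hmemL : ∀ (k : Nat) (hk : k < szs.length), (szs[k], (k : Int)) ∈ L := by
        intro k hk
        refine hp.symm.subset ?_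
        have := getElem_pvPairs szs k (by rw [length_pvPairs]; exact hk)
        exact this ▸ List.getElem_mem _
      -- ---- the minimum: L[0]
      obtain ⟨jN, hjN, hb0⟩ := mem_pvPairs (hp.subset (List.getElem_mem h0len))
      set mn := szs[jN] with hmn
      have hminval : ∀ y ∈ szs, mn ≤ y := by
        intro y hy
        rw [List.mem_iff_getElem] at hy
        obtain ⟨k, hk, rfl⟩ := hy
        have hkL := hmemL k hk
        rw [List.mem_iff_getElem] at hkL
        obtain ⟨q, hq, hval⟩ := hkL
        rcases Nat.eq_zero_or_pos q with hq0 | hq0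
        · subst hq0
          rw [hb0] at hval
          have : mn = szs[k] := by
            have h2 := congrArg Prod.fst hval
            simpa [hmn] using h2
          omega
        · have hlt := List.pairwise_iff_getElem.mp hs 0 q h0len hq hq0
          rw [hb0, hval, pvLt_iff] at hlt
          simp only [hmn]
          rcases hlt with h | ⟨h, -⟩
          · exact le_of_lt h
          · exact le_of_eq h
      have hminmem : mn ∈ szs := List.getElem_mem hjN
      have hmin : PySem.List.min? szs (fun y => y) = some mn := pvMin_eq hminmem hminval
      have hminidx : PySem.List.index? szs mn = some jN := by
        refine pvIndex_eq szs mn jN hjN rfl ?_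
        intro j hjlen hjlt hjv
        have hkL := hmemL j hjlen
        rw [List.mem_iff_getElem] at hkL
        obtain ⟨q, hq, hval⟩ := hkL
        rcases Nat.eq_zero_or_pos q with hq0 | hq0
        · subst hq0
          rw [hb0] at hval
          have := congrArg Prod.snd hval
          simp only at this
          have : (jN : Int) = (j : Int) := this
          omega
        · have hlt := List.pairwise_iff_getElem.mp hs 0 q h0len hq hq0
          rw [hb0, hval, pvLt_iff] at hlt
          simp only at hlt
          rw [hjv] at hlt
          rcases hlt with h | ⟨-, h⟩
          · exact absurd h (lt_irrefl mn)
          · have : (jN : Int) < (j : Int) := h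
            omega
      -- ---- the maximum: L[L.length - 1]
      have hlastlt : L.length - 1 < L.length := by omega
      obtain ⟨kL, hkL, hlast⟩ := mem_pvPairs (hp.subset (List.getElem_mem hlastlt))
      set mx := szs[kL] with hmx
      have hmaxval : ∀ y ∈ szs, y ≤ mx := by
        intro y hy
        rw [List.mem_iff_getElem] at hy
        obtain ⟨k, hk, rfl⟩ := hy
        have hkmem := hmemL k hk
        rw [List.mem_iff_getElem] at hkmem
        obtain ⟨q, hq, hval⟩ := hkmem
        rcases Nat.lt_or_ge q (L.length - 1) with hq1 | hq1
        · have hlt := List.pairwise_iff_getElem.mp hs q (L.length - 1) hq hlastlt hq1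
          rw [hval, hlast, pvLt_iff] at hlt
          simp only [hmx]
          rcases hlt with h | ⟨h, -⟩
          · exact le_of_lt h
          · exact le_of_eq h
        · have hqeq : q = L.length - 1 := by omega
          subst hqeq
          rw [hlast] at hval
          have : szs[k] = mx := by
            have h2 := congrArg Prod.fst hval
            simpa [hmx] using h2.symm
          omega
      have hmaxmem : mx ∈ szs := List.getElem_mem hkL
      have hmax : PySem.List.max? szs (fun y => y) = some mx := pvMax_eq hmaxmem hmaxval
      -- index? szs mx is some value (A computes it in both branches)
      obtain ⟨v0, hv0⟩ := Option.isSome_iff_exists.mp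
        ((PySem.List.index?_isSome_iff szs mx).mpr hmaxmem)
      obtain ⟨hiN0lt, hiN0get, -⟩ := PySem.List.getElem_of_index?_eq_some hv0
      -- ---- rewrite both programs to the same head comparison
      rw [pvGoA, pvGoB]
      simp only []
      rw [if_neg (List.length_pos_iff.mp h0len), if_neg hszne]
      rw [← hszs, hmax, hmin]
      simp only [Option.getD_some]
      rw [hminidx, hv0]
      simp only [Option.getD_some]
      have hgetS : PySem.List.pyGetD szs ((v0 : Nat) : Int) 0 = mx := by
        rw [PySem.List.pyGetD_natCast, List.getD_eq_getElem _ _ hiN0lt, hiN0get]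
      have hgetD : PySem.List.pyGetD szs ((jN : Nat) : Int) 0 = mn := by
        rw [PySem.List.pyGetD_natCast, List.getD_eq_getElem _ _ hjN]
      rw [hgetS, hgetD]
      have hb0get : PySem.List.pyGetD L 0 (0, 0) = (mn, (jN : Int)) := by
        rw [show (0 : Int) = ((0 : Nat) : Int) by norm_num, PySem.List.pyGetD_natCast,
          List.getD_eq_getElem _ _ h0len, hb0]
      have hlastget : (PySem.List.pyGetD L (-1) (0, 0)).1 = mx := by
        rw [pyGetD_neg_one L (0, 0) h0len, List.getD_eq_getElem _ _ hlastlt, hlast]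
      rw [hb0get, hlastget]
      simp only []
      by_cases hstop : mx - mn ≤ 1
      · rw [if_pos hstop, if_pos hstop]
      · rw [if_neg hstop, if_neg hstop]
        -- ---- the move branch: the bisect position p names the first argmax
        obtain ⟨hple, hplo, hphi⟩ := pvBisect_spec L mx (-1) hs
        set p := pvBisect L mx (-1) with hpdef
        have hplt : p < L.length := by
          by_contra hcon
          have := hplo (L.length - 1) hlastlt (by omega)
          rw [hlast, pvLt_iff] at this
          simp only at this
          rcases this with h | ⟨-, h⟩
          · exact absurd h (lt_irrefl mx)
          · omega
        obtain ⟨iN, hiN, hLp⟩ := mem_pvPairs (hp.subset (List.getElem_mem hplt))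
        have hLp1 : szs[iN] = mx := by
          have hnotlt := hphi p hplt le_rfl
          rw [hLp, pvLt_false_iff] at hnotlt
          simp only at hnotlt
          have hle := hmaxval szs[iN] (List.getElem_mem hiN)
          omega
        have hfirstmax : ∀ j (hj : j < szs.length), j < iN → szs[j] ≠ mx := by
          intro j hjlen hjlt hjv
          have hkmem := hmemL j hjlen
          rw [List.mem_iff_getElem] at hkmem
          obtain ⟨q, hq, hval⟩ := hkmem
          rcases Nat.lt_trichotomy q p with hqp | hqp | hqp
          · have := hplo q hq hqp
            rw [hval, pvLt_iff] at this
            simp only at this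
            rcases this with h | ⟨-, h⟩
            · omega
            · omega
          · subst hqp
            rw [hval] at hLp
            have h1 := congrArg Prod.snd hLp
            simp only at h1
            have : (j : Int) = (iN : Int) := h1
            omega
          · have hlt := List.pairwise_iff_getElem.mp hs p q hplt hq hqp
            rw [hLp, hval, pvLt_iff] at hlt
            simp only at hlt
            rw [hLp1] at hlt
            rcases hlt with h | ⟨-, h⟩
            · omega
            · have : (iN : Int) < (j : Int) := h
              omega
        have hidxmax : PySem.List.index? szs mx = some iN :=
          pvIndex_eq szs mx iN hiN hLp1 hfirstmax
        have hv0iN : v0 = iN := by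
          rw [hv0] at hidxmax
          exact Option.some.inj hidxmax
        rw [hv0iN]
        have hppos : 0 < p := by
          rcases Nat.eq_zero_or_pos p with h0 | h0
          · have := hphi 0 h0len (by omega)
            rw [hb0, pvLt_false_iff] at this
            simp only at this
            omega
          · exact h0
        have hgetp : PySem.List.pyGetD L ((p : Nat) : Int) (0, 0) = (mx, (iN : Int)) := by
          rw [PySem.List.pyGetD_natCast, List.getD_eq_getElem _ _ hplt, hLp, hLp1]
        rw [hgetp]
        simp only [Int.toNat_natCast]
        -- ---- the cluster move is the same on both sides: expand the pop
        have hiNcl : iN < cl.length := by omega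
        have hjNcl : jN < cl.length := by omega
        have hclen : (cl[iN].length : Int) = mx := by
          have : szs[iN] = (cl[iN].length : Int) := by simp [hszs]
          omega
        have hmnlen : (cl[jN].length : Int) = mn := by
          have : szs[jN] = (cl[jN].length : Int) := by simp [hszs]
          omega
        have hmn0 : 0 ≤ mn := by rw [← hmnlen]; positivity
        have hijN : iN ≠ jN := by
          intro h
          subst h
          omega
        have hcne : cl[iN] ≠ [] := by
          intro h
          rw [h] at hclen
          simp at hclen
          omega
        have hgetcl : PySem.List.pyGetD cl ((iN : Nat) : Int) [] = cl[iN] := by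
          rw [PySem.List.pyGetD_natCast, List.getD_eq_getElem _ _ hiNcl]
        have hpop := PySem.List.pop?_last (cl[iN]).dropLast ((cl[iN]).getLast hcne)
        rw [List.dropLast_append_getLast hcne] at hpop
        rw [hgetcl, hpop]
        simp only [Option.getD_some]
        have hgetD2 : PySem.List.pyGetD (cl.set iN (cl[iN]).dropLast) ((jN : Nat) : Int) []
            = cl[jN] := by
          rw [PySem.List.pyGetD_natCast,
              List.getD_eq_getElem _ _ (by simpa using hjNcl),
              List.getElem_set_ne hijN]
        rw [hgetD2]
        -- ---- sizes after the move
        have hsz2 : ((cl.set iN (cl[iN]).dropLast).set jN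
              (cl[jN] ++ [(cl[iN]).getLast hcne])).map (fun c => (c.length : Int))
            = (szs.set iN (mx - 1)).set jN (mn + 1) := by
          rw [List.map_set, List.map_set, ← hszs]
          have e1 : (((cl[iN]).dropLast).length : Int) = mx - 1 := by
            rw [List.length_dropLast]
            have : 0 < cl[iN].length := List.length_pos_iff.mpr hcne
            omega
          have e2 : (((cl[jN] ++ [(cl[iN]).getLast hcne])).length : Int) = mn + 1 := by
            rw [List.length_append]
            simp
            omega
          rw [e1, e2]
        -- ---- the invariant for the updated pair list
        have hPn : (pvPairs szs).Nodup := nodup_pvPairs szs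
        have hLn : L.Nodup := hp.symm.nodup hPn
        have hLpval : L[p] = (mx, (iN : Int)) := by rw [hLp, hLp1]
        have hL1erase : L.eraseIdx p = L.erase (mx, (iN : Int)) := by
          rw [← hLpval]
          exact (List.Nodup.erase_getElem hLn p hplt).symm
        have hL1nodup : (L.eraseIdx p).Nodup := (List.eraseIdx_sublist L p).nodup hLn
        have hL2 : 2 ≤ L.length := by omega
        have hL1len : 0 < (L.eraseIdx p).length := by
          rw [List.length_eraseIdx_of_lt hplt]; omega
        have hL1_0 : (L.eraseIdx p)[0] = (mn, (jN : Int)) := by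
          rw [List.getElem_eraseIdx, dif_pos hppos]
          exact hb0
        have hL2erase : (L.eraseIdx p).eraseIdx 0 = (L.eraseIdx p).erase (mn, (jN : Int)) := by
          rw [← hL1_0]
          exact (List.Nodup.erase_getElem hL1nodup 0 hL1len).symm
        have hpermL2 : ((L.eraseIdx p).eraseIdx 0).Perm
            (((pvPairs szs).erase (mx, (iN : Int))).erase (mn, (jN : Int))) := by
          rw [hL2erase, hL1erase]
          exact List.Perm.erase _ (List.Perm.erase _ hp)
        have hsortL2 : ((L.eraseIdx p).eraseIdx 0).Pairwise (fun a b => pvLt a b = true) :=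
          List.Pairwise.sublist ((List.eraseIdx_sublist _ 0).trans (List.eraseIdx_sublist L p)) hs
        have hsubL2P : ∀ y ∈ (L.eraseIdx p).eraseIdx 0, y ∈ pvPairs szs := by
          intro y hy
          exact List.mem_of_mem_erase (List.mem_of_mem_erase (hpermL2.subset hy))
        have hd1 : ∀ y ∈ (L.eraseIdx p).eraseIdx 0, y.2 ≠ (iN : Int) := by
          intro y hy h2
          obtain ⟨k, hk, hyval⟩ := mem_pvPairs (hsubL2P y hy)
          have hkiN : iN = k := by
            have := congrArg Prod.snd hyval
            simp only at this
            rw [h2] at this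
            exact_mod_cast this
          subst hkiN
          rw [hLp1] at hyval
          have : (mx, (iN : Int)) ∈ ((pvPairs szs).erase (mx, (iN : Int))) :=
            List.mem_of_mem_erase (hyval ▸ hpermL2.subset hy)
          exact hPn.not_mem_erase this
        obtain ⟨hsortL3, hpermL3⟩ := insert_bisect ((L.eraseIdx p).eraseIdx 0)
          (mx - 1, (iN : Int)) hsortL2 hd1
        dsimp only at hsortL3 hpermL3
        have hd2 : ∀ y ∈ PySem.List.insert ((L.eraseIdx p).eraseIdx 0)
            ((pvBisect ((L.eraseIdx p).eraseIdx 0) (mx - 1) (iN : Int) : Nat) : Int)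
            (mx - 1, (iN : Int)), y.2 ≠ (jN : Int) := by
          intro y hy h2
          rcases List.mem_cons.mp (hpermL3.subset hy) with hyx | hyL2
          · rw [hyx] at h2
            simp only at h2
            have : iN = jN := by exact_mod_cast h2
            exact hijN this
          · obtain ⟨k, hk, hyval⟩ := mem_pvPairs (hsubL2P y hyL2)
            have hkjN : jN = k := by
              have := congrArg Prod.snd hyval
              simp only at this
              rw [h2] at this
              exact_mod_cast this
            subst hkjN
            rw [← hmn] at hyval
            have hbmem : (mn, (jN : Int)) ∈ (((pvPairs szs).erase (mx, (iN : Int))).erase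
                (mn, (jN : Int))) := hyval ▸ hpermL2.subset hyL2
            exact (List.Nodup.erase _ hPn).not_mem_erase hbmem
        obtain ⟨hsortL4, hpermL4⟩ := insert_bisect _ (mn + 1, (jN : Int)) hsortL3 hd2
        dsimp only at hsortL4 hpermL4
        -- the updated canonical pair list
        have hPiN : (pvPairs szs)[iN]'(by rw [length_pvPairs]; exact hiN) = (mx, (iN : Int)) := by
          rw [getElem_pvPairs, hLp1]
        have hPlen : iN < (pvPairs szs).length := by rw [length_pvPairs]; exact hiN
        have hQperm : ((pvPairs szs).set iN (mx - 1, (iN : Int))).Perm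
            ((mx - 1, (iN : Int)) :: (pvPairs szs).erase (mx, (iN : Int))) := by
          have h1 := perm_set_cons_eraseIdx (pvPairs szs) iN (mx - 1, (iN : Int)) hPlen
          have he : (pvPairs szs).eraseIdx iN = (pvPairs szs).erase (mx, (iN : Int)) := by
            rw [← hPiN]
            exact (List.Nodup.erase_getElem hPn iN hPlen).symm
          rw [he] at h1
          exact h1
        have hQnodup : ((pvPairs szs).set iN (mx - 1, (iN : Int))).Nodup := by
          refine hQperm.symm.nodup ?_
          rw [List.nodup_cons]
          refine ⟨?_, hPn.erase _⟩
          intro hmem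
          obtain ⟨k, hk, hyval⟩ := mem_pvPairs (List.mem_of_mem_erase hmem)
          have hkiN : k = iN := by
            have := congrArg Prod.snd hyval
            simp only at this
            exact_mod_cast this.symm
          subst hkiN
          have := congrArg Prod.fst hyval
          simp only at this
          omega
        have hQjNlt : jN < ((pvPairs szs).set iN (mx - 1, (iN : Int))).length := by
          rw [List.length_set, length_pvPairs]; exact hjN
        have hQjN : ((pvPairs szs).set iN (mx - 1, (iN : Int)))[jN]'hQjNlt = (mn, (jN : Int)) := by
          rw [List.getElem_set_ne hijN, getElem_pvPairs]
        have hQset := perm_set_cons_eraseIdx ((pvPairs szs).set iN (mx - 1, (iN : Int))) jN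
          (mn + 1, (jN : Int)) hQjNlt
        have heQ : ((pvPairs szs).set iN (mx - 1, (iN : Int))).eraseIdx jN
            = ((pvPairs szs).set iN (mx - 1, (iN : Int))).erase (mn, (jN : Int)) := by
          rw [← hQjN]
          exact (List.Nodup.erase_getElem hQnodup jN hQjNlt).symm
        have hne_ab : ¬ ((mx - 1, (iN : Int)) = ((mn, (jN : Int)) : Int × Int)) := by
          intro h
          have := congrArg Prod.snd h
          simp only at this
          have : iN = jN := by exact_mod_cast this
          exact hijN this
        have herase3 : (((pvPairs szs).set iN (mx - 1, (iN : Int))).erase (mn, (jN : Int))).Perm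
            ((mx - 1, (iN : Int)) :: (((pvPairs szs).erase (mx, (iN : Int))).erase
              (mn, (jN : Int)))) := by
          have h1 := List.Perm.erase (mn, (jN : Int)) hQperm
          rw [List.erase_cons_tail (by simpa using hne_ab)] at h1
          exact h1
        have hfinal : pvPairs ((szs.set iN (mx - 1)).set jN (mn + 1))
            = ((pvPairs szs).set iN (mx - 1, (iN : Int))).set jN (mn + 1, (jN : Int)) := by
          rw [pvPairs_set _ jN _ (by rw [List.length_set]; exact hjN), pvPairs_set szs iN _ hiN]
        -- apply the induction hypothesis
        refine ih _ _ hsortL4 ?_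
        rw [hsz2, hfinal]
        refine hpermL4.trans ?_
        refine (List.Perm.cons _ (hpermL3.trans (List.Perm.cons _ hpermL2))).trans ?_
        refine (List.Perm.cons _ herase3.symm).trans ?_
        refine (hQset.trans ?_).symm.trans ?_
        · rw [heQ]
        · exact List.Perm.refl _

-- building L by sorted insertions over enumerate(clusters)
theorem pvBuild : ∀ (cs : List (List Int)) (s : Int) (L : List (Int × Int)),
    L.Pairwise (fun a b => pvLt a b = true) → (∀ y ∈ L, y.2 < s) →
    (((PySem.List.enumerate cs s).foldl
      (fun L pc => PySem.List.insert L ((pvBisect L (pc.2.length : Int) pc.1 : Nat) : Int)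
        ((pc.2.length : Int), pc.1)) L).Pairwise (fun a b => pvLt a b = true) ∧
     ((PySem.List.enumerate cs s).foldl
      (fun L pc => PySem.List.insert L ((pvBisect L (pc.2.length : Int) pc.1 : Nat) : Int)
        ((pc.2.length : Int), pc.1)) L).Perm (pvPairsAux (cs.map fun c => (c.length : Int)) s ++ L)) := by
  intro cs
  induction cs with
  | nil =>
    intro s L hsrt _
    refine ⟨by simpa [PySem.List.enumerate_nil] using hsrt, ?_⟩
    simp [PySem.List.enumerate_nil, pvPairsAux]
  | cons c cs ih =>
    intro s L hsrt hlt
    rw [PySem.List.enumerate_cons, List.foldl_cons]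
    have hins := insert_bisect L ((c.length : Int), s) hsrt
      (fun y hy => by have := hlt y hy; simp only; omega)
    obtain ⟨hsrt', hperm'⟩ := hins
    dsimp only at hsrt' hperm' 
    have hlt' : ∀ y ∈ PySem.List.insert L ((pvBisect L (c.length : Int) s : Nat) : Int)
        ((c.length : Int), s), y.2 < s + 1 := by
      intro y hy
      rw [hperm'.mem_iff] at hy
      rcases List.mem_cons.mp hy with h | h
      · subst h; simp
      · have := hlt y h; omega
    obtain ⟨h1, h2⟩ := ih (s + 1) _ hsrt' hlt'
    refine ⟨by dsimp only; exact h1, ?_⟩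
    dsimp only
    have hfin : pvPairsAux ((c :: cs).map fun c => (c.length : Int)) s
        = ((c.length : Int), s) :: pvPairsAux (cs.map fun c => (c.length : Int)) (s + 1) := by
      simp [pvPairsAux, PySem.List.enumerate_cons]
    rw [hfin]
    refine (h2.trans ?_)
    refine (List.Perm.append_left _ hperm').trans ?_
    exact List.perm_middle

-- ===== VERDICT (by name: the statements are the Claim_ definitions above) =====
theorem balance_load_spec : Claim_equal_balance_load := by
  intro cl _ _
  unfold Spec_balance_load balance_load balance_load_alt
  have h := pvBuild cl 0 [] (by simp) (by simp)
  rw [pvMainLoop (pvFuel cl) cl _ h.1 (by simpa [pvPairs] using h.2)]
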